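-- pv_equiv track=rewrite | github.com/rudenkornk/dotfiles | scripts/targets/update_utils.py | _materialize_templated_url
-- ===== SOURCE A (Python) =====
-- def _materialize_templated_url(url: str) -> str:
--     dummy_map = {
--         "{{ ansible_architecture }}": "x86_64",
--         "{{ ansible_distribution }}": "Ubuntu",
--         "{{ deb_arch }}": "amd64",
--         "{{ pack_arch }}": "amd64",
--         "{{ pack }}": "deb",
--     }
--     for key, value in dummy_map.items():
--         url = url.replace(key, value)
--     return url
-- ===== SOURCE B (Python) =====
-- def _materialize_templated_url(url: str) -> str:
--     dummy_map = {
--         "{{ ansible_architecture }}": "x86_64",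
--         "{{ ansible_distribution }}": "Ubuntu",
--         "{{ deb_arch }}": "amd64",
--         "{{ pack_arch }}": "amd64",
--         "{{ pack }}": "deb",
--     }
--     parts = []
--     i = 0
--     n = len(url)
--     while i < n:
--         for key, value in dummy_map.items():
--             if url.startswith(key, i):
--                 parts.append(value)
--                 i += len(key)
--                 break
--         else:
--             parts.append(url[i])
--             i += 1
--     return "".join(parts)
-- ===== Notes on version B (the rewrite author's own statement) =====
-- stated objective: alternative
-- what changed: Replaces five sequential full-string str.replace passes by a single left-to-right scan that at each position tries the five placeholders in order and emits the dummy value or the current character, joining the pieces once at the end.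
import Mathlib
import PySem

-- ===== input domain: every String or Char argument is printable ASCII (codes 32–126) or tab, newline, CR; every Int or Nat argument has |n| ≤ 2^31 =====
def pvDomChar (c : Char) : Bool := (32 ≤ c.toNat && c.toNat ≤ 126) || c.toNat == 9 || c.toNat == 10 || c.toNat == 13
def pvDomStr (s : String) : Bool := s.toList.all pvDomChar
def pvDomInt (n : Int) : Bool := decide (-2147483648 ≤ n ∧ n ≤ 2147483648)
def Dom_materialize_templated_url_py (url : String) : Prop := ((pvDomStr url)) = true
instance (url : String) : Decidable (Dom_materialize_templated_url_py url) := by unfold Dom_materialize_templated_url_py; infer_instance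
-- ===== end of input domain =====

-- B replaces A's five sequential full-string str.replace passes by one left-to-right scan
-- that tries the five placeholders at each position (objective: alternative single-pass algorithm).

-- ===== PORT A =====
-- for key, value in dummy_map.items(): url = url.replace(key, value)
def materialize_templated_url_py (url : String) : String :=
  let dummy_map : List (String × String) :=
    [("{{ ansible_architecture }}", "x86_64"),
     ("{{ ansible_distribution }}", "Ubuntu"),
     ("{{ deb_arch }}", "amd64"),
     ("{{ pack_arch }}", "amd64"),
     ("{{ pack }}", "deb")]
  dummy_map.foldl (fun u kv => PySem.Str.replace u kv.1 kv.2) url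

-- ===== PORT B =====
-- B scans the string once; at each position it tries the five keys in dict order:
-- on a match it emits the dummy value and skips the key, otherwise it emits the character.
def pvAltGo : List Char → List Char
  | [] => []
  | c :: t =>
    if List.isPrefixOf "{{ ansible_architecture }}".toList (c :: t) then
      "x86_64".toList ++ pvAltGo ((c :: t).drop 26)
    else if List.isPrefixOf "{{ ansible_distribution }}".toList (c :: t) then
      "Ubuntu".toList ++ pvAltGo ((c :: t).drop 26)
    else if List.isPrefixOf "{{ deb_arch }}".toList (c :: t) then
      "amd64".toList ++ pvAltGo ((c :: t).drop 14)
    else if List.isPrefixOf "{{ pack_arch }}".toList (c :: t) then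
      "amd64".toList ++ pvAltGo ((c :: t).drop 15)
    else if List.isPrefixOf "{{ pack }}".toList (c :: t) then
      "deb".toList ++ pvAltGo ((c :: t).drop 10)
    else
      c :: pvAltGo t
termination_by s => s.length
decreasing_by all_goals (simp [List.length_drop] <;> omega)

def materialize_templated_url_py_alt (url : String) : String :=
  String.ofList (pvAltGo url.toList)

-- ===== PRECONDITION & SPEC =====
def Spec_materialize_templated_url_py (url : String) (out : String) : Prop := out = materialize_templated_url_py_alt url
instance (url : String) (out : String) : Decidable (Spec_materialize_templated_url_py url out) := by unfold Spec_materialize_templated_url_py; infer_instance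

-- ===== CLAIM (what is proved, stated in full; the proofs are below) =====
def Claim_equal_materialize_templated_url_py : Prop := ∀ (url : String), Dom_materialize_templated_url_py url → Spec_materialize_templated_url_py url (materialize_templated_url_py url)

-- ===== LEMMAS AND PROOFS =====

-- the five keys and values, as lists of chars
abbrev pK1 : List Char := "{{ ansible_architecture }}".toList
abbrev pK2 : List Char := "{{ ansible_distribution }}".toList
abbrev pK3 : List Char := "{{ deb_arch }}".toList
abbrev pK4 : List Char := "{{ pack_arch }}".toList
abbrev pK5 : List Char := "{{ pack }}".toList
abbrev pV1 : List Char := "x86_64".toList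
abbrev pV2 : List Char := "Ubuntu".toList
abbrev pV3 : List Char := "amd64".toList
abbrev pV4 : List Char := "amd64".toList
abbrev pV5 : List Char := "deb".toList

-- clean accumulator-free form of Python's str.replace (for a nonempty pattern)
def pvRepl (k v : List Char) : List Char → List Char
  | [] => []
  | c :: t =>
    if h : k ≠ [] ∧ k.isPrefixOf (c :: t) then
      v ++ pvRepl k v ((c :: t).drop k.length)
    else
      c :: pvRepl k v t
termination_by s => s.length
decreasing_by
  · have hk : 0 < k.length := List.length_pos_of_ne_nil h.1
    simp [List.length_drop]; omega
  · simp

-- p never overlaps an occurrence of k: no suffix of p is a prefix of k, nor k of it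
abbrev pvSep (p k : List Char) : Prop :=
  ∀ n, n < p.length → ¬ (p.drop n <+: k) ∧ ¬ (k <+: p.drop n)

lemma pv_prefix_append {α : Type} {k p w : List α} (h : k <+: p ++ w) :
    k <+: p ∨ p <+: k := by
  by_cases hl : k.length ≤ p.length
  · exact Or.inl (List.prefix_of_prefix_length_le h (p.prefix_append w) hl)
  · exact Or.inr (List.prefix_of_prefix_length_le (p.prefix_append w) h ((not_le.mp hl).le))

lemma pvRepl_nil (k v : List Char) : pvRepl k v [] = [] := by simp [pvRepl]

lemma pvRepl_match {k : List Char} (v : List Char) {s : List Char}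
    (hk : k ≠ []) (hp : k <+: s) :
    pvRepl k v s = v ++ pvRepl k v (s.drop k.length) := by
  cases s with
  | nil => exact absurd (List.prefix_nil.mp hp) hk
  | cons c t =>
    rw [pvRepl, dif_pos ⟨hk, List.isPrefixOf_iff_prefix.mpr hp⟩]

lemma pvRepl_nomatch {k : List Char} (v : List Char) {c : Char} {t : List Char}
    (hp : ¬ k <+: c :: t) :
    pvRepl k v (c :: t) = c :: pvRepl k v t := by
  rw [pvRepl, dif_neg]
  intro h
  exact hp (List.isPrefixOf_iff_prefix.mp h.2)

-- replacing k by v inside p ++ w never touches p when p cannot overlap k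
lemma pvRepl_append (k v : List Char) (hk : k ≠ []) :
    ∀ (p w : List Char), pvSep p k → pvRepl k v (p ++ w) = p ++ pvRepl k v w := by
  intro p
  induction p with
  | nil => intro w _; simp
  | cons a p' ih =>
    intro w hsep
    have h0 := hsep 0 (by simp)
    simp only [List.drop_zero] at h0
    have hnp : ¬ k <+: (a :: p') ++ w := by
      intro h
      rcases pv_prefix_append h with h' | h'
      · exact h0.2 h'
      · exact h0.1 h'
    rw [List.cons_append, pvRepl_nomatch v (by simpa [List.cons_append] using hnp)]
    rw [ih w (fun n hn => by simpa using hsep (n + 1) (by simpa using hn))]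
    simp

-- replacing k by v never creates a new occurrence of q at the front when q cannot overlap v
lemma pvRepl_prefix (k v : List Char) (hk : k ≠ []) :
    ∀ (N : Nat) (s q : List Char), s.length ≤ N → pvSep q v →
      q <+: pvRepl k v s → q <+: s := by
  intro N
  induction N with
  | zero =>
    intro s q hs _ h
    have : s = [] := List.length_eq_zero_iff.mp (Nat.le_zero.mp hs)
    subst this
    rw [pvRepl_nil] at h
    simpa [List.prefix_nil.mp h] using List.nil_prefix
  | succ N ih =>
    intro s q hs hsep h
    by_cases hp : k <+: s
    · rw [pvRepl_match v hk hp] at h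
      cases q with
      | nil => exact List.nil_prefix
      | cons b q' =>
        rcases pv_prefix_append h with h' | h'
        · exact absurd h' (hsep 0 (by simp)).1
        · exact absurd h' (hsep 0 (by simp)).2
    · cases s with
      | nil =>
        rw [pvRepl_nil] at h
        simpa [List.prefix_nil.mp h] using List.nil_prefix
      | cons c t =>
        rw [pvRepl_nomatch v hp] at h
        cases q with
        | nil => exact List.nil_prefix
        | cons b q' =>
          rw [List.cons_prefix_cons] at h
          have hq' := ih t q' (by simpa using Nat.le_of_succ_le_succ (by simpa using hs))
            (fun n hn => by simpa using hsep (n + 1) (by simpa using hn)) h.2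
          exact List.cons_prefix_cons.mpr ⟨h.1, hq'⟩

-- the fuel/accumulator loop of PySem.Chars.replace, characterised
lemma pv_go_zero (old new l acc : List Char) :
    PySem.Chars.replace.go old new 0 l acc = acc.reverse ++ l := rfl

lemma pv_go_nil (old new : List Char) (fuel : Nat) (acc : List Char) :
    PySem.Chars.replace.go old new (fuel + 1) [] acc = acc.reverse := rfl

lemma pv_go_cons (old new : List Char) (fuel : Nat) (c : Char) (t acc : List Char) :
    PySem.Chars.replace.go old new (fuel + 1) (c :: t) acc =
      if old.isPrefixOf (c :: t) then
        PySem.Chars.replace.go old new fuel ((c :: t).drop old.length) (new.reverse ++ acc)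
      else
        PySem.Chars.replace.go old new fuel t (c :: acc) := rfl

lemma pv_go_acc (old new : List Char) :
    ∀ (fuel : Nat) (l acc : List Char),
      PySem.Chars.replace.go old new fuel l acc =
        acc.reverse ++ PySem.Chars.replace.go old new fuel l [] := by
  intro fuel
  induction fuel with
  | zero => intro l acc; simp [pv_go_zero]
  | succ fuel ih =>
    intro l acc
    cases l with
    | nil => simp [pv_go_nil]
    | cons c t =>
      rw [pv_go_cons, pv_go_cons]
      split_ifs with h
      · rw [ih _ (new.reverse ++ acc), ih _ (new.reverse ++ [])]
        simp
      · rw [ih _ (c :: acc), ih _ [c]]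
        simp

lemma pv_go_spec (old new : List Char) (hk : old ≠ []) :
    ∀ (fuel : Nat) (s : List Char), s.length ≤ fuel →
      PySem.Chars.replace.go old new fuel s [] = pvRepl old new s := by
  intro fuel
  induction fuel with
  | zero =>
    intro s hs
    have : s = [] := List.length_eq_zero_iff.mp (Nat.le_zero.mp hs)
    subst this
    simp [pv_go_zero, pvRepl_nil]
  | succ fuel ih =>
    intro s hs
    cases s with
    | nil => simp [pv_go_nil, pvRepl_nil]
    | cons c t =>
      rw [pv_go_cons]
      split_ifs with h
      · have hpre : old <+: c :: t := List.isPrefixOf_iff_prefix.mp h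
        have hlen : 0 < old.length := List.length_pos_of_ne_nil hk
        rw [pv_go_acc, ih ((c :: t).drop old.length) (by simp [List.length_drop]; simp at hs; omega)]
        rw [pvRepl_match new hk hpre]
        simp
      · have hpre : ¬ old <+: c :: t := fun hp => h (List.isPrefixOf_iff_prefix.mpr hp)
        rw [pv_go_acc, ih t (by simpa using Nat.le_of_succ_le_succ (by simpa using hs))]
        rw [pvRepl_nomatch new hpre]
        simp

lemma pv_replace_eq (s old new : List Char) (hk : old ≠ []) :
    PySem.Chars.replace s old new = pvRepl old new s := by
  rw [PySem.Chars.replace]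
  rw [if_neg (by simp [List.isEmpty_iff, hk])]
  exact pv_go_spec old new hk s.length s le_rfl

-- unfolding lemmas for B's scanner
lemma pvAltGo_match1 {s : List Char} (h : pK1 <+: s) :
    pvAltGo s = pV1 ++ pvAltGo (s.drop 26) := by
  cases s with
  | nil => exact absurd (List.prefix_nil.mp h) (by decide)
  | cons c t =>
    rw [pvAltGo, if_pos (List.isPrefixOf_iff_prefix.mpr h)]

lemma pvAltGo_match2 {s : List Char} (h1 : ¬ pK1 <+: s) (h : pK2 <+: s) :
    pvAltGo s = pV2 ++ pvAltGo (s.drop 26) := by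
  cases s with
  | nil => exact absurd (List.prefix_nil.mp h) (by decide)
  | cons c t =>
    rw [pvAltGo, if_neg (fun hb => h1 (List.isPrefixOf_iff_prefix.mp hb)),
        if_pos (List.isPrefixOf_iff_prefix.mpr h)]

lemma pvAltGo_match3 {s : List Char} (h1 : ¬ pK1 <+: s) (h2 : ¬ pK2 <+: s) (h : pK3 <+: s) :
    pvAltGo s = pV3 ++ pvAltGo (s.drop 14) := by
  cases s with
  | nil => exact absurd (List.prefix_nil.mp h) (by decide)
  | cons c t =>
    rw [pvAltGo, if_neg (fun hb => h1 (List.isPrefixOf_iff_prefix.mp hb)),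
        if_neg (fun hb => h2 (List.isPrefixOf_iff_prefix.mp hb)),
        if_pos (List.isPrefixOf_iff_prefix.mpr h)]

lemma pvAltGo_match4 {s : List Char} (h1 : ¬ pK1 <+: s) (h2 : ¬ pK2 <+: s)
    (h3 : ¬ pK3 <+: s) (h : pK4 <+: s) :
    pvAltGo s = pV4 ++ pvAltGo (s.drop 15) := by
  cases s with
  | nil => exact absurd (List.prefix_nil.mp h) (by decide)
  | cons c t =>
    rw [pvAltGo, if_neg (fun hb => h1 (List.isPrefixOf_iff_prefix.mp hb)),
        if_neg (fun hb => h2 (List.isPrefixOf_iff_prefix.mp hb)),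
        if_neg (fun hb => h3 (List.isPrefixOf_iff_prefix.mp hb)),
        if_pos (List.isPrefixOf_iff_prefix.mpr h)]

lemma pvAltGo_match5 {s : List Char} (h1 : ¬ pK1 <+: s) (h2 : ¬ pK2 <+: s)
    (h3 : ¬ pK3 <+: s) (h4 : ¬ pK4 <+: s) (h : pK5 <+: s) :
    pvAltGo s = pV5 ++ pvAltGo (s.drop 10) := by
  cases s with
  | nil => exact absurd (List.prefix_nil.mp h) (by decide)
  | cons c t =>
    rw [pvAltGo, if_neg (fun hb => h1 (List.isPrefixOf_iff_prefix.mp hb)),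
        if_neg (fun hb => h2 (List.isPrefixOf_iff_prefix.mp hb)),
        if_neg (fun hb => h3 (List.isPrefixOf_iff_prefix.mp hb)),
        if_neg (fun hb => h4 (List.isPrefixOf_iff_prefix.mp hb)),
        if_pos (List.isPrefixOf_iff_prefix.mpr h)]

lemma pvAltGo_nomatch {c : Char} {t : List Char}
    (h1 : ¬ pK1 <+: c :: t) (h2 : ¬ pK2 <+: c :: t) (h3 : ¬ pK3 <+: c :: t)
    (h4 : ¬ pK4 <+: c :: t) (h5 : ¬ pK5 <+: c :: t) :
    pvAltGo (c :: t) = c :: pvAltGo t := by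
  rw [pvAltGo, if_neg (fun hb => h1 (List.isPrefixOf_iff_prefix.mp hb)),
      if_neg (fun hb => h2 (List.isPrefixOf_iff_prefix.mp hb)),
      if_neg (fun hb => h3 (List.isPrefixOf_iff_prefix.mp hb)),
      if_neg (fun hb => h4 (List.isPrefixOf_iff_prefix.mp hb)),
      if_neg (fun hb => h5 (List.isPrefixOf_iff_prefix.mp hb))]

-- A's five passes, as one expression
abbrev pvA (s : List Char) : List Char :=
  pvRepl pK5 pV5 (pvRepl pK4 pV4 (pvRepl pK3 pV3 (pvRepl pK2 pV2 (pvRepl pK1 pV1 s))))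

lemma pvMain : ∀ (N : Nat) (s : List Char), s.length ≤ N → pvA s = pvAltGo s := by
  intro N
  induction N with
  | zero =>
    intro s hs
    have : s = [] := List.length_eq_zero_iff.mp (Nat.le_zero.mp hs)
    subst this
    simp [pvA, pvRepl_nil, pvAltGo]
  | succ N ih =>
    intro s hs
    by_cases h1 : pK1 <+: s
    · rcases h1 with ⟨u, hu⟩
      subst hu
      rw [pvA, pvRepl_match pV1 (by decide) (pK1.prefix_append u), List.drop_left,
          pvRepl_append pK2 pV2 (by decide) pV1 _ (by decide),
          pvRepl_append pK3 pV3 (by decide) pV1 _ (by decide),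
          pvRepl_append pK4 pV4 (by decide) pV1 _ (by decide),
          pvRepl_append pK5 pV5 (by decide) pV1 _ (by decide)]
      rw [pvAltGo_match1 (pK1.prefix_append u),
          show (pK1 ++ u).drop 26 = u by rw [show (26:Nat) = pK1.length from by decide]; exact List.drop_left]
      exact congrArg (fun x => pV1 ++ x) (ih u (by rw [List.length_append] at hs; have e : pK1.length = 26 := (by decide); omega))
    · by_cases h2 : pK2 <+: s
      · rcases h2 with ⟨u, hu⟩
        subst hu
        rw [pvA, pvRepl_append pK1 pV1 (by decide) pK2 u (by decide),
            pvRepl_match pV2 (by decide) (pK2.prefix_append _), List.drop_left,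
            pvRepl_append pK3 pV3 (by decide) pV2 _ (by decide),
            pvRepl_append pK4 pV4 (by decide) pV2 _ (by decide),
            pvRepl_append pK5 pV5 (by decide) pV2 _ (by decide)]
        rw [pvAltGo_match2 h1 (pK2.prefix_append u),
            show (pK2 ++ u).drop 26 = u by rw [show (26:Nat) = pK2.length from by decide]; exact List.drop_left]
        exact congrArg (fun x => pV2 ++ x) (ih u (by rw [List.length_append] at hs; have e : pK2.length = 26 := (by decide); omega))
      · by_cases h3 : pK3 <+: s
        · rcases h3 with ⟨u, hu⟩
          subst hu
          rw [pvA, pvRepl_append pK1 pV1 (by decide) pK3 u (by decide),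
              pvRepl_append pK2 pV2 (by decide) pK3 _ (by decide),
              pvRepl_match pV3 (by decide) (pK3.prefix_append _), List.drop_left,
              pvRepl_append pK4 pV4 (by decide) pV3 _ (by decide),
              pvRepl_append pK5 pV5 (by decide) pV3 _ (by decide)]
          rw [pvAltGo_match3 h1 h2 (pK3.prefix_append u),
              show (pK3 ++ u).drop 14 = u by rw [show (14:Nat) = pK3.length from by decide]; exact List.drop_left]
          exact congrArg (fun x => pV3 ++ x) (ih u (by rw [List.length_append] at hs; have e : pK3.length = 14 := (by decide); omega))
        · by_cases h4 : pK4 <+: s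
          · rcases h4 with ⟨u, hu⟩
            subst hu
            rw [pvA, pvRepl_append pK1 pV1 (by decide) pK4 u (by decide),
                pvRepl_append pK2 pV2 (by decide) pK4 _ (by decide),
                pvRepl_append pK3 pV3 (by decide) pK4 _ (by decide),
                pvRepl_match pV4 (by decide) (pK4.prefix_append _), List.drop_left,
                pvRepl_append pK5 pV5 (by decide) pV4 _ (by decide)]
            rw [pvAltGo_match4 h1 h2 h3 (pK4.prefix_append u),
                show (pK4 ++ u).drop 15 = u by rw [show (15:Nat) = pK4.length from by decide]; exact List.drop_left]
            exact congrArg (fun x => pV4 ++ x) (ih u (by rw [List.length_append] at hs; have e : pK4.length = 15 := (by decide); omega))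
          · by_cases h5 : pK5 <+: s
            · rcases h5 with ⟨u, hu⟩
              subst hu
              rw [pvA, pvRepl_append pK1 pV1 (by decide) pK5 u (by decide),
                  pvRepl_append pK2 pV2 (by decide) pK5 _ (by decide),
                  pvRepl_append pK3 pV3 (by decide) pK5 _ (by decide),
                  pvRepl_append pK4 pV4 (by decide) pK5 _ (by decide),
                  pvRepl_match pV5 (by decide) (pK5.prefix_append _), List.drop_left]
              rw [pvAltGo_match5 h1 h2 h3 h4 (pK5.prefix_append u),
                  show (pK5 ++ u).drop 10 = u by rw [show (10:Nat) = pK5.length from by decide]; exact List.drop_left]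
              exact congrArg (fun x => pV5 ++ x) (ih u (by rw [List.length_append] at hs; have e : pK5.length = 10 := (by decide); omega))
            · cases s with
              | nil => simp [pvA, pvRepl_nil, pvAltGo]
              | cons c t =>
                -- no key matches at the front: every pass forwards c
                have e1 : pvRepl pK1 pV1 (c :: t) = c :: pvRepl pK1 pV1 t :=
                  pvRepl_nomatch pV1 h1
                have n2 : ¬ pK2 <+: pvRepl pK1 pV1 (c :: t) := fun hp =>
                  h2 (pvRepl_prefix pK1 pV1 (by decide) (c :: t).length (c :: t) pK2
                    le_rfl (by decide) hp)
                rw [e1] at n2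
                have e2 : pvRepl pK2 pV2 (c :: pvRepl pK1 pV1 t) =
                    c :: pvRepl pK2 pV2 (pvRepl pK1 pV1 t) := pvRepl_nomatch pV2 n2
                have n3 : ¬ pK3 <+: pvRepl pK2 pV2 (pvRepl pK1 pV1 (c :: t)) := fun hp =>
                  h3 (pvRepl_prefix pK1 pV1 (by decide) (c :: t).length (c :: t) pK3 le_rfl
                    (by decide)
                    (pvRepl_prefix pK2 pV2 (by decide) (pvRepl pK1 pV1 (c :: t)).length _ pK3
                      le_rfl (by decide) hp))
                rw [e1, e2] at n3
                have e3 : pvRepl pK3 pV3 (c :: pvRepl pK2 pV2 (pvRepl pK1 pV1 t)) =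
                    c :: pvRepl pK3 pV3 (pvRepl pK2 pV2 (pvRepl pK1 pV1 t)) :=
                  pvRepl_nomatch pV3 n3
                have n4 : ¬ pK4 <+: pvRepl pK3 pV3 (pvRepl pK2 pV2 (pvRepl pK1 pV1 (c :: t))) :=
                  fun hp =>
                  h4 (pvRepl_prefix pK1 pV1 (by decide) (c :: t).length (c :: t) pK4 le_rfl
                    (by decide)
                    (pvRepl_prefix pK2 pV2 (by decide) (pvRepl pK1 pV1 (c :: t)).length _ pK4
                      le_rfl (by decide)
                      (pvRepl_prefix pK3 pV3 (by decide)
                        (pvRepl pK2 pV2 (pvRepl pK1 pV1 (c :: t))).length _ pK4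
                        le_rfl (by decide) hp)))
                rw [e1, e2, e3] at n4
                have e4 : pvRepl pK4 pV4 (c :: pvRepl pK3 pV3 (pvRepl pK2 pV2 (pvRepl pK1 pV1 t))) =
                    c :: pvRepl pK4 pV4 (pvRepl pK3 pV3 (pvRepl pK2 pV2 (pvRepl pK1 pV1 t))) :=
                  pvRepl_nomatch pV4 n4
                have n5 : ¬ pK5 <+:
                    pvRepl pK4 pV4 (pvRepl pK3 pV3 (pvRepl pK2 pV2 (pvRepl pK1 pV1 (c :: t)))) :=
                  fun hp =>
                  h5 (pvRepl_prefix pK1 pV1 (by decide) (c :: t).length (c :: t) pK5 le_rfl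
                    (by decide)
                    (pvRepl_prefix pK2 pV2 (by decide) (pvRepl pK1 pV1 (c :: t)).length _ pK5
                      le_rfl (by decide)
                      (pvRepl_prefix pK3 pV3 (by decide)
                        (pvRepl pK2 pV2 (pvRepl pK1 pV1 (c :: t))).length _ pK5
                        le_rfl (by decide)
                        (pvRepl_prefix pK4 pV4 (by decide)
                          (pvRepl pK3 pV3 (pvRepl pK2 pV2 (pvRepl pK1 pV1 (c :: t)))).length _ pK5
                          le_rfl (by decide) hp))))
                rw [e1, e2, e3, e4] at n5
                have e5 : pvRepl pK5 pV5
                      (c :: pvRepl pK4 pV4 (pvRepl pK3 pV3 (pvRepl pK2 pV2 (pvRepl pK1 pV1 t)))) =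
                    c :: pvRepl pK5 pV5
                      (pvRepl pK4 pV4 (pvRepl pK3 pV3 (pvRepl pK2 pV2 (pvRepl pK1 pV1 t)))) :=
                  pvRepl_nomatch pV5 n5
                rw [pvA, e1, e2, e3, e4, e5, pvAltGo_nomatch h1 h2 h3 h4 h5]
                exact congrArg (fun x => c :: x)
                  (ih t (by simpa using Nat.le_of_succ_le_succ (by simpa using hs)))

-- ===== VERDICT (by name: the statement is the Claim_ definition above) =====
lemma pv_top (s : List Char) :
    PySem.Chars.replace (PySem.Chars.replace (PySem.Chars.replace (PySem.Chars.replace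
      (PySem.Chars.replace s pK1 pV1) pK2 pV2) pK3 pV3) pK4 pV4) pK5 pV5 = pvAltGo s := by
  rw [pv_replace_eq _ pK1 pV1 (by decide), pv_replace_eq _ pK2 pV2 (by decide),
      pv_replace_eq _ pK3 pV3 (by decide), pv_replace_eq _ pK4 pV4 (by decide),
      pv_replace_eq _ pK5 pV5 (by decide)]
  exact pvMain s.length s le_rfl

theorem materialize_templated_url_py_spec : Claim_equal_materialize_templated_url_py := by
  intro url _
  show materialize_templated_url_py url = materialize_templated_url_py_alt url
  apply String.toList_inj.mp
  simp only [materialize_templated_url_py, materialize_templated_url_py_alt, List.foldl,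
    PySem.Str.toList_replace, String.toList_ofList]
  exact pv_top url.toList
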